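-- pv_equiv track=rewrite | github.com/LukeEapen/leapfrog | poc3b/backend/app.py | is_stub_or_empty
-- ===== SOURCE A (Python) =====
-- def is_stub_or_empty(code):
--     # Simple check for stubs or empty code
--     if not code or code.strip() == '':
--         return True
--     stub_keywords = [
--         'pass', '...', 'raise NotImplementedError', 'TODO', 'to be implemented', 'stub', 'placeholder', 'return None'
--     ]
--     code_lower = code.lower()
--     for kw in stub_keywords:
--         if kw in code_lower:
--             return True
--     return False
-- ===== SOURCE B (Python) =====
-- def is_stub_or_empty(code):
--     # Single left-to-right scan over the lowered text: at each position, test whether any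
--     # stub keyword starts there.  Keywords are stored lowercase so that case-insensitive
--     # matching actually works ('TODO', 'raise NotImplementedError', 'return None' in A can
--     # never match the lowercased code).
--     if not code or code.strip() == '':
--         return True
--     stub_keywords = (
--         'pass', '...', 'raise notimplementederror', 'todo',
--         'to be implemented', 'stub', 'placeholder', 'return none'
--     )
--     s = code.lower()
--     for i in range(len(s)):
--         tail = s[i:]
--         if any(tail.startswith(kw) for kw in stub_keywords):
--             return True
--     return False
-- ===== Notes on version B (the rewrite author's own statement) =====
-- stated objective: alternative
-- what changed: B replaces A's per-keyword rescans of the text with a single left-to-right scan over the suffixes of the lowered code testing each keyword as a prefix, and stores the keywords in lowercase so that the three mixed-case keywords actually match.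
-- intended difference: On non-blank code that contains 'raise NotImplementedError', 'TODO' or 'return None' case-insensitively but none of the all-lowercase keywords, A returns False (it compares mixed-case keywords against the lowercased code, so they can never match) while B returns True, which is the intended stub detection. — e.g. on is_stub_or_empty("TODO"): A returns false, B returns true
import Mathlib
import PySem

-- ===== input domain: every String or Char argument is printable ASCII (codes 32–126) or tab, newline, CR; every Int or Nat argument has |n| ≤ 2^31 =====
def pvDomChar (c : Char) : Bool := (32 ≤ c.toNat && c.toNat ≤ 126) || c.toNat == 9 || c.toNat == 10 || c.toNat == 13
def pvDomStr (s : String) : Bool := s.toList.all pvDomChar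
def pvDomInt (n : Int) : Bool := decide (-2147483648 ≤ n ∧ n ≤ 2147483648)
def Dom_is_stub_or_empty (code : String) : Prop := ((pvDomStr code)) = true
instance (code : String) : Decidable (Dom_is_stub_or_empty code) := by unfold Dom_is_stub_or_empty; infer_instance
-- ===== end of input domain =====

-- B replaces A's keyword-by-keyword rescans with a single left-to-right scan of the lowered
-- text and stores the keywords lowercase, so case-insensitive matching actually works
-- (objective: alternative algorithm plus a fix of A's dead mixed-case keywords).

-- ===== PORT A =====
def is_stub_or_empty (code : String) : Bool :=
  if code == "" || PySem.Str.strip code == "" then true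
  else
    let stub_keywords : List String :=
      ["pass", "...", "raise NotImplementedError", "TODO", "to be implemented", "stub", "placeholder", "return None"]
    let code_lower := PySem.Str.lower code
    stub_keywords.any (fun kw => PySem.Str.isIn kw code_lower)

-- ===== PORT B =====
-- one pass over the suffixes of the lowered text; at each position test every keyword
def altScan (kws : List (List Char)) : List Char → Bool
  | [] => false
  | c :: t => kws.any (fun kw => PySem.Chars.startswith (c :: t) kw) || altScan kws t

def is_stub_or_empty_alt (code : String) : Bool :=
  if code == "" || PySem.Str.strip code == "" then true
  else
    let stub_keywords : List (List Char) :=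
      (["pass", "...", "raise notimplementederror", "todo", "to be implemented", "stub", "placeholder", "return none"] : List String).map String.toList
    altScan stub_keywords (PySem.Chars.lower code.toList)

-- ===== PRECONDITION & SPEC =====
-- A lowercases the code but keeps the mixed-case keywords 'raise NotImplementedError', 'TODO',
-- 'return None', which therefore can never match: on non-blank code that contains one of those
-- keywords case-insensitively and none of the all-lowercase keywords, A returns false while B
-- returns true, which is the intended stub detection.
def D_is_stub_or_empty (code : String) : Prop :=
  ¬(code = "" ∨ PySem.Str.strip code = "") ∧
  (∃ kw ∈ (["raise notimplementederror", "todo", "return none"] : List String),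
      PySem.Str.isIn kw (PySem.Str.lower code) = true) ∧
  (∀ kw ∈ (["pass", "...", "to be implemented", "stub", "placeholder"] : List String),
      PySem.Str.isIn kw (PySem.Str.lower code) = false)
instance (code : String) : Decidable (D_is_stub_or_empty code) := by unfold D_is_stub_or_empty; infer_instance

def Spec_is_stub_or_empty (code : String) (out : Bool) : Prop :=
  ¬ D_is_stub_or_empty code → out = is_stub_or_empty_alt code
instance (code : String) (out : Bool) : Decidable (Spec_is_stub_or_empty code out) := by unfold Spec_is_stub_or_empty; infer_instance

def pvDiffWitness_is_stub_or_empty : String := "TODO"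
def pvDiffWitnessOut_is_stub_or_empty : Bool × Bool := (false, true)

-- ===== CLAIM (what is proved, stated in full; the proofs are below) =====
def Claim_unchanged_is_stub_or_empty : Prop := ∀ (code : String), Dom_is_stub_or_empty code → Spec_is_stub_or_empty code (is_stub_or_empty code)
def Claim_changed_is_stub_or_empty : Prop := Dom_is_stub_or_empty (pvDiffWitness_is_stub_or_empty) ∧ D_is_stub_or_empty (pvDiffWitness_is_stub_or_empty) ∧ is_stub_or_empty (pvDiffWitness_is_stub_or_empty) = pvDiffWitnessOut_is_stub_or_empty.1 ∧ is_stub_or_empty_alt (pvDiffWitness_is_stub_or_empty) = pvDiffWitnessOut_is_stub_or_empty.2 ∧ pvDiffWitnessOut_is_stub_or_empty.1 ≠ pvDiffWitnessOut_is_stub_or_empty.2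
def Claim_exact_is_stub_or_empty : Prop := ∀ (code : String), Dom_is_stub_or_empty code → D_is_stub_or_empty code → is_stub_or_empty code ≠ is_stub_or_empty_alt code

-- ===== LEMMAS AND PROOFS =====

lemma lowerChar_not_upper (c : Char) : PySem.Chars.isupper (PySem.Chars.lowerChar c) = false := by
  unfold PySem.Chars.lowerChar
  split_ifs with h
  · have h' := h
    unfold PySem.Chars.isupper at h'
    simp only [Bool.and_eq_true, decide_eq_true_eq, Char.le_def, UInt32.le_iff_toNat_le] at h'
    have h1 : 65 ≤ c.val.toNat := by simpa using h'.1
    have h2 : c.val.toNat ≤ 90 := by simpa using h'.2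
    have hv : Nat.isValidChar (c.toNat + 32) := Or.inl (show c.val.toNat + 32 < 0xd800 by omega)
    have htn : (Char.ofNat (c.toNat + 32)).toNat = c.toNat + 32 := by simp [Char.ofNat, hv]
    unfold PySem.Chars.isupper
    simp only [Bool.and_eq_false_iff, decide_eq_false_iff_not, Char.le_def, UInt32.le_iff_toNat_le]
    right
    intro hcon
    have hc1 : (Char.ofNat (c.toNat + 32)).val.toNat ≤ 'Z'.val.toNat := by simpa using hcon
    have hz : 'Z'.val.toNat = 90 := by decide
    have hc2 : (Char.ofNat (c.toNat + 32)).val.toNat = c.val.toNat + 32 := htn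
    omega
  · simpa using h

lemma mem_lower_not_upper (l : List Char) (c : Char) (h : c ∈ PySem.Chars.lower l) :
    PySem.Chars.isupper c = false := by
  simp only [PySem.Chars.lower, List.mem_map] at h
  obtain ⟨d, -, rfl⟩ := h
  exact lowerChar_not_upper d

-- a keyword containing an uppercase letter is never a substring of lowered text
lemma not_infix_lower (kw : List Char) (c : Char) (hc : c ∈ kw)
    (hu : PySem.Chars.isupper c = true) (l : List Char) :
    ¬ kw <:+: PySem.Chars.lower l := by
  intro h
  have := mem_lower_not_upper l c (h.sublist.subset hc)
  simp [this] at hu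

-- B's scan finds exactly the (nonempty) keywords occurring as substrings
lemma altScan_iff (kws : List (List Char)) (hne : ∀ kw ∈ kws, kw ≠ []) (l : List Char) :
    altScan kws l = true ↔ ∃ kw ∈ kws, kw <:+: l := by
  induction l with
  | nil =>
    simp only [altScan, List.infix_nil]
    constructor
    · intro h; cases h
    · rintro ⟨kw, hm, rfl⟩; exact absurd rfl (hne _ hm)
  | cons c t ih =>
    simp only [altScan, Bool.or_eq_true, List.any_eq_true, PySem.Chars.startswith,
      List.isPrefixOf_iff_prefix, ih, List.infix_cons_iff]
    constructor
    · rintro (⟨kw, hm, hp⟩ | ⟨kw, hm, hi⟩)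
      · exact ⟨kw, hm, Or.inl hp⟩
      · exact ⟨kw, hm, Or.inr hi⟩
    · rintro ⟨kw, hm, hp | hi⟩
      · exact Or.inl ⟨kw, hm, hp⟩
      · exact Or.inr ⟨kw, hm, hi⟩

lemma isIn_lower_iff (kw code : String) :
    PySem.Str.isIn kw (PySem.Str.lower code) = true ↔ kw.toList <:+: PySem.Chars.lower code.toList := by
  rw [PySem.Str.isIn_iff_infix, PySem.Str.toList_lower]

lemma isIn_lower_eq_false_iff (kw code : String) :
    PySem.Str.isIn kw (PySem.Str.lower code) = false ↔ ¬ kw.toList <:+: PySem.Chars.lower code.toList := by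
  rw [Bool.eq_false_iff, ne_eq, isIn_lower_iff]

lemma hT (code : String) : ¬ ("TODO".toList <:+: PySem.Chars.lower code.toList) :=
  not_infix_lower _ 'T' (by decide) (by decide) _

lemma hN1 (code : String) : ¬ ("raise NotImplementedError".toList <:+: PySem.Chars.lower code.toList) :=
  not_infix_lower _ 'N' (by decide) (by decide) _

lemma hN2 (code : String) : ¬ ("return None".toList <:+: PySem.Chars.lower code.toList) :=
  not_infix_lower _ 'N' (by decide) (by decide) _

lemma altScan_keywords_iff (code : String) :
    altScan ((["pass", "...", "raise notimplementederror", "todo", "to be implemented", "stub", "placeholder", "return none"] : List String).map String.toList)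
      (PySem.Chars.lower code.toList) = true ↔
    ∃ kw ∈ (["pass", "...", "raise notimplementederror", "todo", "to be implemented", "stub", "placeholder", "return none"] : List String),
      kw.toList <:+: PySem.Chars.lower code.toList := by
  rw [altScan_iff _ (by decide)]
  constructor
  · rintro ⟨kw, hm, hi⟩
    simp only [List.mem_map] at hm
    obtain ⟨s, hs, rfl⟩ := hm
    exact ⟨s, hs, hi⟩
  · rintro ⟨s, hs, hi⟩
    exact ⟨s.toList, List.mem_map_of_mem hs, hi⟩

set_option maxHeartbeats 1600000 in
theorem is_stub_or_empty_spec : Claim_unchanged_is_stub_or_empty := by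
  intro code _
  unfold Spec_is_stub_or_empty
  intro hd
  unfold is_stub_or_empty is_stub_or_empty_alt
  by_cases hg : (code == "" || PySem.Str.strip code == "") = true
  · simp [hg]
  · simp only [Bool.not_eq_true] at hg
    simp only [hg, Bool.false_eq_true, if_false]
    rw [Bool.eq_iff_iff, altScan_keywords_iff]
    simp only [List.any_eq_true, List.mem_cons, List.not_mem_nil, or_false, exists_eq_or_imp,
      exists_eq_left, isIn_lower_iff]
    have h1 := hT code
    have h2 := hN1 code
    have h3 := hN2 code
    have hguard : ¬(code = "" ∨ PySem.Str.strip code = "") := by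
      simp only [Bool.or_eq_false_iff, beq_eq_false_iff_ne, ne_eq] at hg
      tauto
    unfold D_is_stub_or_empty at hd
    simp only [hguard, not_false_eq_true, true_and, not_and, List.mem_cons, List.not_mem_nil,
      or_false, forall_eq_or_imp, forall_eq, exists_eq_or_imp, exists_eq_left,
      isIn_lower_iff, isIn_lower_eq_false_iff] at hd
    clear hguard
    revert hd h1 h2 h3
    generalize ("pass".toList <:+: PySem.Chars.lower code.toList) = P1
    generalize ("...".toList <:+: PySem.Chars.lower code.toList) = P2
    generalize ("raise NotImplementedError".toList <:+: PySem.Chars.lower code.toList) = U1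
    generalize ("TODO".toList <:+: PySem.Chars.lower code.toList) = U2
    generalize ("to be implemented".toList <:+: PySem.Chars.lower code.toList) = P3
    generalize ("stub".toList <:+: PySem.Chars.lower code.toList) = P4
    generalize ("placeholder".toList <:+: PySem.Chars.lower code.toList) = P5
    generalize ("return None".toList <:+: PySem.Chars.lower code.toList) = U3
    generalize ("raise notimplementederror".toList <:+: PySem.Chars.lower code.toList) = Q1
    generalize ("todo".toList <:+: PySem.Chars.lower code.toList) = Q2
    generalize ("return none".toList <:+: PySem.Chars.lower code.toList) = Q3
    tauto

set_option maxHeartbeats 1000000 in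
theorem is_stub_or_empty_changed : Claim_changed_is_stub_or_empty := by
  unfold Claim_changed_is_stub_or_empty
  refine ⟨by decide, by decide, by decide, by decide, by decide⟩

set_option maxHeartbeats 1600000 in
theorem is_stub_or_empty_tight : Claim_exact_is_stub_or_empty := by
  intro code _ hd
  obtain ⟨hguard, hdead, hlive⟩ := hd
  have hg : (code == "" || PySem.Str.strip code == "") = false := by
    simp only [Bool.or_eq_false_iff, beq_eq_false_iff_ne, ne_eq]
    tauto
  unfold is_stub_or_empty is_stub_or_empty_alt
  simp only [hg, Bool.false_eq_true, if_false]
  intro hcontra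
  rw [Bool.eq_iff_iff, altScan_keywords_iff] at hcontra
  simp only [List.mem_cons, List.not_mem_nil, or_false, forall_eq_or_imp, forall_eq,
    exists_eq_or_imp, exists_eq_left, isIn_lower_iff, isIn_lower_eq_false_iff] at hlive hdead hcontra ⊢
  simp only [List.any_eq_true, List.mem_cons, List.not_mem_nil, or_false, exists_eq_or_imp,
    exists_eq_left, isIn_lower_iff] at hcontra
  have h1 := hT code
  have h2 := hN1 code
  have h3 := hN2 code
  revert hlive hdead hcontra h1 h2 h3
  generalize ("pass".toList <:+: PySem.Chars.lower code.toList) = P1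
  generalize ("...".toList <:+: PySem.Chars.lower code.toList) = P2
  generalize ("raise NotImplementedError".toList <:+: PySem.Chars.lower code.toList) = U1
  generalize ("TODO".toList <:+: PySem.Chars.lower code.toList) = U2
  generalize ("to be implemented".toList <:+: PySem.Chars.lower code.toList) = P3
  generalize ("stub".toList <:+: PySem.Chars.lower code.toList) = P4
  generalize ("placeholder".toList <:+: PySem.Chars.lower code.toList) = P5
  generalize ("return None".toList <:+: PySem.Chars.lower code.toList) = U3
  generalize ("raise notimplementederror".toList <:+: PySem.Chars.lower code.toList) = Q1
  generalize ("todo".toList <:+: PySem.Chars.lower code.toList) = Q2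
  generalize ("return none".toList <:+: PySem.Chars.lower code.toList) = Q3
  intro hlive hdead hiff hU2 hU1 hU3
  obtain ⟨n1, n2, n3, n4, n5⟩ := hlive
  have hL : P1 ∨ P2 ∨ U1 ∨ U2 ∨ P3 ∨ P4 ∨ P5 ∨ U3 := by
    apply hiff.mpr
    rcases hdead with q | q | q
    · exact Or.inr (Or.inr (Or.inl q))
    · exact Or.inr (Or.inr (Or.inr (Or.inl q)))
    · exact Or.inr (Or.inr (Or.inr (Or.inr (Or.inr (Or.inr (Or.inr q))))))
  rcases hL with h | h | h | h | h | h | h | h <;>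
    first | exact n1 h | exact n2 h | exact hU1 h | exact hU2 h | exact n3 h | exact n4 h | exact n5 h | exact hU3 h
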